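-- pv_equiv track=rewrite | github.com/th3code/krotki | main.py | sprawdz
-- ===== SOURCE A (Python) =====
-- krotka2 = (5, 4, 1,)
--
-- def sprawdz(k1, k2):
--     licznik = 0
--     for x in k2:
--         for y in k1:
--             if x == y:
--                 licznik += 1
--
--     if licznik == len(krotka2):
--         return True
--     else:
--         return False
-- ===== SOURCE B (Python) =====
-- krotka2 = (5, 4, 1,)
--
-- def sprawdz(k1, k2):
--     # Sort both sequences, then a single two-pointer merge over equal-value
--     # runs: each shared value v contributes (run of v in k1) * (run of v in k2)
--     # matching pairs.  O((n+m) log(n+m)) instead of A's O(n*m) nested scans.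
--     a = sorted(k1)
--     b = sorted(k2)
--     total = 0
--     i = j = 0
--     while i < len(a) and j < len(b):
--         if a[i] < b[j]:
--             i += 1
--         elif b[j] < a[i]:
--             j += 1
--         else:
--             v = a[i]
--             i0, j0 = i, j
--             while i < len(a) and a[i] == v:
--                 i += 1
--             while j < len(b) and b[j] == v:
--                 j += 1
--             total += (i - i0) * (j - j0)
--     return total == len(krotka2)
-- ===== Notes on version B (the rewrite author's own statement) =====
-- stated objective: faster
-- what changed: Sorts both lists and counts matching pairs in one two-pointer merge over equal-value runs (sum of run-length products), replacing A's nested scan of k1 for every element of k2.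
import Mathlib
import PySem

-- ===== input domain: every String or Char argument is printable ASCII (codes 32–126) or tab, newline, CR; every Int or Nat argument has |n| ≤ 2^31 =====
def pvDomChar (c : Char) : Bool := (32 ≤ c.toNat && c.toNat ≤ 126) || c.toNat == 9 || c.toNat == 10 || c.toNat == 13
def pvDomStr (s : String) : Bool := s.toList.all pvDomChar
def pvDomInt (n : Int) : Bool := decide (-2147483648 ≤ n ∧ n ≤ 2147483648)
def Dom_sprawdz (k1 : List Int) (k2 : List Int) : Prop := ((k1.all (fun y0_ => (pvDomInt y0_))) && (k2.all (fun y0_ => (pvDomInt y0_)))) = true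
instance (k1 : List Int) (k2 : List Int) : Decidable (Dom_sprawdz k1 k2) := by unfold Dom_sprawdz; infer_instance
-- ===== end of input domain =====

-- B sorts both lists and counts matching pairs by a two-pointer merge over equal-value runs (asymptotically faster than A's nested scans); the return value is proved equal on all inputs.

-- ===== PORT A =====
def krotka2 : List Int := [5, 4, 1]

def sprawdz (k1 : List Int) (k2 : List Int) : Bool :=
  let licznik : Int :=
    k2.foldl (fun acc x =>
      k1.foldl (fun acc2 y => if x == y then acc2 + 1 else acc2) acc) 0
  if licznik == (krotka2.length : Int) then true else false

-- ===== PORT B =====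
-- B's merge loop: two sorted lists, advance past the smaller head; on equal heads
-- take both runs of that value and add the product of their lengths.
def pairMerge : List Int → List Int → Int
  | [], _ => 0
  | _ :: _, [] => 0
  | x :: xs, y :: ys =>
    if x < y then pairMerge xs (y :: ys)
    else if y < x then pairMerge (x :: xs) ys
    else
      ((((x :: xs).takeWhile (fun z => z == x)).length : Int) *
        (((y :: ys).takeWhile (fun z => z == x)).length : Int)) +
      pairMerge ((x :: xs).dropWhile (fun z => z == x)) ((y :: ys).dropWhile (fun z => z == x))
termination_by a b => a.length + b.length
decreasing_by
  · simp only [List.length_cons]; omega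
  · simp only [List.length_cons]; omega
  · have h1 : ((x :: xs).dropWhile (fun z => z == x)).length ≤ xs.length := by
      rw [List.dropWhile_cons_of_pos (by simp)]
      exact List.length_dropWhile_le _ _
    have h2 : ((y :: ys).dropWhile (fun z => z == x)).length ≤ ys.length := by
      rw [List.dropWhile_cons_of_pos (by simp; omega)]
      exact List.length_dropWhile_le _ _
    simp only [List.length_cons]; omega

def sprawdz_alt (k1 : List Int) (k2 : List Int) : Bool :=
  let a := PySem.List.sorted k1 (fun x => x) false
  let b := PySem.List.sorted k2 (fun x => x) false
  pairMerge a b == (krotka2.length : Int)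

-- ===== PRECONDITION & SPEC =====
def Spec_sprawdz (k1 : List Int) (k2 : List Int) (out : Bool) : Prop := out = sprawdz_alt k1 k2
instance (k1 : List Int) (k2 : List Int) (out : Bool) : Decidable (Spec_sprawdz k1 k2 out) := by unfold Spec_sprawdz; infer_instance

-- ===== CLAIM (what is proved, stated in full; the proofs are below) =====
def Claim_equal_sprawdz : Prop := ∀ (k1 : List Int) (k2 : List Int), Dom_sprawdz k1 k2 → Spec_sprawdz k1 k2 (sprawdz k1 k2)

-- ===== LEMMAS AND PROOFS =====

-- total pair count, specification form: Σ_{y ∈ b} (count of y in a)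
def pairSum (a b : List Int) : Int := (b.map (fun y => (a.count y : Int))).sum

-- A's inner loop adds the number of occurrences of x in k1 to the accumulator.
theorem inner_fold_count (k1 : List Int) (x : Int) (acc : Int) :
    k1.foldl (fun acc2 y => if x == y then acc2 + 1 else acc2) acc = acc + (k1.count x : Int) := by
  induction k1 generalizing acc with
  | nil => simp
  | cons h t ih =>
    simp only [List.foldl_cons, List.count_cons, ih]
    by_cases hx : x = h
    · simp [hx]; ring
    · simp [hx, Ne.symm hx]

theorem foldl_add_map (f : Int → Int) (l : List Int) (acc : Int) :
    l.foldl (fun s x => s + f x) acc = acc + (l.map f).sum := by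
  induction l generalizing acc with
  | nil => simp
  | cons h t ih => simp only [List.foldl_cons, List.map_cons, List.sum_cons, ih]; ring

theorem outer_fold_sum (k1 k2 : List Int) (acc : Int) :
    k2.foldl (fun acc x => k1.foldl (fun acc2 y => if x == y then acc2 + 1 else acc2) acc) acc
      = acc + pairSum k1 k2 := by
  have hfun : (fun (acc : Int) (x : Int) =>
      k1.foldl (fun acc2 y => if x == y then acc2 + 1 else acc2) acc)
      = fun acc x => acc + (k1.count x : Int) := by
    funext acc x; exact inner_fold_count k1 x acc
  rw [hfun, foldl_add_map]
  rfl

-- sorted head is a lower bound for everything in the list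
theorem sorted_head_le {x : Int} {xs : List Int} (h : (x :: xs).Pairwise (· ≤ ·)) :
    ∀ z ∈ x :: xs, x ≤ z := by
  intro z hz
  rcases List.mem_cons.mp hz with rfl | hz
  · exact le_refl z
  · exact (List.pairwise_cons.mp h).1 z hz

-- every element surviving dropWhile (== x) in a sorted list is strictly greater than x
theorem dropWhile_gt (x : Int) :
    ∀ (l : List Int), l.Pairwise (· ≤ ·) → (∀ z ∈ l, x ≤ z) →
      ∀ z ∈ l.dropWhile (fun z => z == x), x < z := by
  intro l
  induction l with
  | nil => intro _ _ z hz; simp at hz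
  | cons h t ih =>
    intro hs hlb z hz
    by_cases hh : h = x
    · rw [List.dropWhile_cons_of_pos (by simp [hh])] at hz
      exact ih (List.pairwise_cons.mp hs).2
        (fun w hw => hlb w (List.mem_cons_of_mem _ hw)) z hz
    · rw [List.dropWhile_cons_of_neg (by simp [hh])] at hz
      have hxh : x < h := lt_of_le_of_ne (hlb h (List.mem_cons_self)) (Ne.symm hh)
      rcases List.mem_cons.mp hz with rfl | hz
      · exact hxh
      · exact lt_of_lt_of_le hxh ((List.pairwise_cons.mp hs).1 z hz)

-- every element of takeWhile (== x) equals x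
theorem mem_takeWhile_eq (x : Int) (l : List Int) :
    ∀ z ∈ l.takeWhile (fun z => z == x), z = x := by
  intro z hz
  have := List.mem_takeWhile_imp hz
  simpa using this

-- sum of a constant function over a list
theorem sum_map_const {l : List Int} {f : Int → Int} {c : Int}
    (h : ∀ z ∈ l, f z = c) : (l.map f).sum = l.length * c := by
  induction l with
  | nil => simp
  | cons a t ih =>
    simp only [List.map_cons, List.sum_cons, List.length_cons]
    rw [h a List.mem_cons_self, ih (fun z hz => h z (List.mem_cons_of_mem _ hz))]
    push_cast; ring

-- the merge computes pairSum on sorted inputs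
theorem pairMerge_eq_pairSum :
    ∀ (a b : List Int), a.Pairwise (· ≤ ·) → b.Pairwise (· ≤ ·) →
      pairMerge a b = pairSum a b := by
  intro a b
  induction a, b using pairMerge.induct with
  | case1 b =>
    intro _ _
    simp [pairMerge, pairSum]
  | case2 x xs =>
    intro _ _
    simp [pairMerge, pairSum]
  | case3 x xs y ys hlt ih =>
    intro ha hb
    rw [pairMerge, if_pos hlt, ih (List.pairwise_cons.mp ha).2 hb]
    -- x < y ≤ every z in y::ys, so x never matches: drop x from the counts
    unfold pairSum
    congr 1
    apply List.map_congr_left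
    intro z hz
    have hyz : y ≤ z := sorted_head_le hb z hz
    have : x ≠ z := by omega
    simp [this]
  | case4 x xs y ys hnlt hlt ih =>
    intro ha hb
    rw [pairMerge, if_neg hnlt, if_pos hlt, ih ha (List.pairwise_cons.mp hb).2]
    -- y < x ≤ every z in x::xs, so y occurs 0 times in a
    have hy0 : (x :: xs).count y = 0 := by
      rw [List.count_eq_zero]
      intro hmem
      have := sorted_head_le ha y hmem
      omega
    simp [pairSum, hy0]
  | case5 x xs y ys hnlt1 hnlt2 ih =>
    intro ha hb
    have hxy : x = y := by omega
    have hlbA : ∀ w ∈ x :: xs, x ≤ w := sorted_head_le ha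
    have hlbB : ∀ w ∈ y :: ys, x ≤ w := by
      intro w hw; rw [hxy]; exact sorted_head_le hb w hw
    have hdaS : ((x :: xs).dropWhile (fun z => z == x)).Pairwise (· ≤ ·) :=
      List.Pairwise.sublist (List.dropWhile_sublist _) ha
    have hdbS : ((y :: ys).dropWhile (fun z => z == x)).Pairwise (· ≤ ·) :=
      List.Pairwise.sublist (List.dropWhile_sublist _) hb
    have hgtA := dropWhile_gt x (x :: xs) ha hlbA
    have hgtB := dropWhile_gt x (y :: ys) hb hlbB
    have hta_all := mem_takeWhile_eq x (x :: xs)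
    have htb_all := mem_takeWhile_eq x (y :: ys)
    have hcountA : ∀ w : Int, ((x :: xs).count w : Int)
        = (((x :: xs).takeWhile (fun z => z == x)).count w : Int)
          + (((x :: xs).dropWhile (fun z => z == x)).count w : Int) := by
      intro w
      conv_lhs => rw [← List.takeWhile_append_dropWhile (p := fun z => z == x) (l := x :: xs)]
      rw [List.count_append]; push_cast; ring
    have hta_count : ∀ w : Int, (((x :: xs).takeWhile (fun z => z == x)).count w : Int)
        = if w = x then (((x :: xs).takeWhile (fun z => z == x)).length : Int) else 0 := by
      intro w
      by_cases hw : w = x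
      · rw [hw, if_pos rfl]
        norm_cast
        rw [List.count_eq_length]
        intro u hu
        exact (hta_all u hu).symm
      · rw [if_neg hw]
        norm_cast
        rw [List.count_eq_zero]
        intro hm; exact hw (hta_all w hm)
    have hda_x : (((x :: xs).dropWhile (fun z => z == x)).count x : Int) = 0 := by
      have h0 : ((x :: xs).dropWhile (fun z => z == x)).count x = 0 := by
        rw [List.count_eq_zero]; intro hm; exact absurd (hgtA x hm) (lt_irrefl x)
      exact_mod_cast h0
    rw [pairMerge, if_neg hnlt1, if_neg hnlt2, ih hdaS hdbS]
    have hsplit : pairSum (x :: xs) (y :: ys)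
        = pairSum (x :: xs) ((y :: ys).takeWhile (fun z => z == x))
          + pairSum (x :: xs) ((y :: ys).dropWhile (fun z => z == x)) := by
      unfold pairSum
      conv_lhs => rw [← List.takeWhile_append_dropWhile (p := fun z => z == x) (l := y :: ys)]
      rw [List.map_append, List.sum_append]
    have h1 : pairSum (x :: xs) ((y :: ys).takeWhile (fun z => z == x))
        = (((x :: xs).takeWhile (fun z => z == x)).length : Int)
          * (((y :: ys).takeWhile (fun z => z == x)).length : Int) := by
      unfold pairSum
      rw [sum_map_const (c := (((x :: xs).takeWhile (fun z => z == x)).length : Int))]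
      · ring
      · intro w hw
        have hwx : w = x := htb_all w hw
        rw [hcountA w, hta_count w, hwx, hda_x]
        simp
    have h2 : pairSum (x :: xs) ((y :: ys).dropWhile (fun z => z == x))
        = pairSum ((x :: xs).dropWhile (fun z => z == x)) ((y :: ys).dropWhile (fun z => z == x)) := by
      unfold pairSum
      apply congrArg
      apply List.map_congr_left
      intro w hw
      have hwgt : x < w := hgtB w hw
      have h0 : (((x :: xs).takeWhile (fun z => z == x)).count w : Int) = 0 := by
        rw [hta_count w]; simp; omega
      rw [hcountA w, h0]
      ring
    rw [hsplit, h1, h2]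

theorem sprawdz_spec : Claim_equal_sprawdz := by
  intro k1 k2 _
  unfold Spec_sprawdz sprawdz sprawdz_alt
  simp only
  rw [outer_fold_sum]
  have hs1 := PySem.List.sorted_pairwise (xs := k1) (key := fun x : Int => x)
  have hs2 := PySem.List.sorted_pairwise (xs := k2) (key := fun x : Int => x)
  rw [pairMerge_eq_pairSum _ _ hs1 hs2]
  have hperm : pairSum (PySem.List.sorted k1 (fun x => x) false)
      (PySem.List.sorted k2 (fun x => x) false) = pairSum k1 k2 := by
    unfold pairSum
    have hcnt : ∀ z : Int,
        ((PySem.List.sorted k1 (fun x => x) false).count z : Int) = (k1.count z : Int) := by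
      intro z
      rw [(PySem.List.sorted_perm k1 (fun x => x) false).count_eq]
    calc ((PySem.List.sorted k2 (fun x => x) false).map
            (fun y => ((PySem.List.sorted k1 (fun x => x) false).count y : Int))).sum
        = ((PySem.List.sorted k2 (fun x => x) false).map (fun y => (k1.count y : Int))).sum := by
          apply congrArg; exact List.map_congr_left (fun z _ => hcnt z)
      _ = (k2.map (fun y => (k1.count y : Int))).sum :=
          ((PySem.List.sorted_perm k2 (fun x => x) false).map _).sum_eq
  rw [hperm]
  split <;> simp_all
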